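-- pv_equiv track=rewrite | github.com/simenfritzner/Apple-Catcher-Analysis | eeg_mi/interpretability/artifacts.py | _build_channel_groups
-- ===== SOURCE A (Python) =====
-- from typing import Dict, List, Literal, Optional, Tuple
--
-- _REGION_PREFIXES: Dict[str, List[str]] = {
--     'frontal': ['Fp', 'AF', 'F'],
--     'central': ['C', 'FC'],
--     'parietal': ['P', 'CP'],
--     'occipital': ['O', 'PO'],
--     'temporal': ['T', 'TP'],
-- }
--
-- _EXCLUSION_MAP: Dict[str, List[str]] = {
--     'frontal': ['FC'],
--     'central': ['CP'],
--     'parietal': ['PO'],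
--     'occipital': [],
--     'temporal': [],
-- }
--
-- def _classify_channel(name: str) -> Optional[str]:
--     """
--     Classify a channel name into a scalp region.
--
--     Uses standard 10-20 naming conventions. Channels that do not
--     match any region return None.
--     """
--     for region, prefixes in _REGION_PREFIXES.items():
--         exclusions = _EXCLUSION_MAP[region]
--         for prefix in prefixes:
--             if name.startswith(prefix):
--                 # Check if a longer exclusion prefix matches instead
--                 excluded = False
--                 for exc in exclusions:
--                     if name.startswith(exc):
--                         excluded = True
--                         break
--                 if not excluded:
--                     return region
--     return None
--
-- def _build_channel_groups(
--     channel_names: List[str],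
-- ) -> Dict[str, List[int]]:
--     """
--     Map each channel to its scalp region and return group-to-index mapping.
--
--     Returns:
--         Dictionary mapping region name to list of channel indices.
--     """
--     groups: Dict[str, List[int]] = {
--         'frontal': [],
--         'central': [],
--         'parietal': [],
--         'occipital': [],
--         'temporal': [],
--     }
--
--     for idx, name in enumerate(channel_names):
--         region = _classify_channel(name)
--         if region is not None:
--             groups[region].append(idx)
--
--     return groups
-- ===== SOURCE B (Python) =====
-- # Flat longest-prefix lookup table replaces the nested region/prefix/exclusion scans.
-- _PREFIX_REGION = {
--     'Fp': 'frontal', 'AF': 'frontal', 'F': 'frontal',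
--     'FC': 'central', 'C': 'central',
--     'CP': 'parietal', 'P': 'parietal',
--     'PO': 'occipital', 'O': 'occipital',
--     'TP': 'temporal', 'T': 'temporal',
-- }
--
-- _REGIONS = ('frontal', 'central', 'parietal', 'occipital', 'temporal')
--
-- def _region_of(name):
--     r = _PREFIX_REGION.get(name[:2])
--     return r if r is not None else _PREFIX_REGION.get(name[:1])
--
-- def _build_channel_groups(channel_names):
--     labels = [_region_of(n) for n in channel_names]
--     return {r: [i for i, l in enumerate(labels) if l == r] for r in _REGIONS}
-- ===== Notes on version B (the rewrite author's own statement) =====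
-- stated objective: simpler
-- what changed: Replaces A's nested region/prefix/exclusion scans with a single flat prefix-to-region dict consulted on name[:2] then name[:1] (longest match), and builds the result with one comprehension per region instead of an in-place append loop.
import Mathlib
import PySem

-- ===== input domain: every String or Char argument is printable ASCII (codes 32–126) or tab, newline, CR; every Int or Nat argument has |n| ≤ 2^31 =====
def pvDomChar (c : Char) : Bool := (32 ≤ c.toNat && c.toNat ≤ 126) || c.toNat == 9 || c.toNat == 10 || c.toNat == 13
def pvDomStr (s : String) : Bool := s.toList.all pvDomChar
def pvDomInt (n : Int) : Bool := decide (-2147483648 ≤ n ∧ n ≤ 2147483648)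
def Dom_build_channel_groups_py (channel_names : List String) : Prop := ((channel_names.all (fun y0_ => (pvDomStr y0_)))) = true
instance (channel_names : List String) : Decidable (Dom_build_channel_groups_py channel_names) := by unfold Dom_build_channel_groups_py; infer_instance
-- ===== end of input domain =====

-- B replaces the nested region/prefix/exclusion scans of A with a single flat
-- prefix→region lookup table consulted on the first two (then one) characters
-- of each name, and builds the result by one comprehension per region (simpler).

-- ===== PORT A =====
-- module constant _REGION_PREFIXES (a dict iterated in insertion order)
def pvRegionPrefixes : List (String × List String) :=
  [("frontal", ["Fp", "AF", "F"]),
   ("central", ["C", "FC"]),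
   ("parietal", ["P", "CP"]),
   ("occipital", ["O", "PO"]),
   ("temporal", ["T", "TP"])]

-- module constant _EXCLUSION_MAP
def pvExclusionMap : PySem.Dict String (List String) :=
  PySem.Dict.ofList
    [("frontal", ["FC"]), ("central", ["CP"]), ("parietal", ["PO"]),
     ("occipital", []), ("temporal", [])]

-- inner 'for prefix in prefixes' loop of _classify_channel (the 'for exc … break'
-- loop computing `excluded` is List.any, exact for a first-hit boolean flag)
def pvTryPrefixes (name : String) (region : String) (exclusions : List String) :
    List String → Option String
  | [] => none
  | p :: ps =>
    if PySem.Str.startswith name p then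
      if exclusions.any (fun exc => PySem.Str.startswith name exc) then
        pvTryPrefixes name region exclusions ps
      else some region
    else pvTryPrefixes name region exclusions ps

-- outer 'for region, prefixes in _REGION_PREFIXES.items()' loop
-- (_EXCLUSION_MAP[region]: the key is always present, so getD with [] is exact)
def pvClassifyLoop (name : String) : List (String × List String) → Option String
  | [] => none
  | (region, prefixes) :: rest =>
    let exclusions := PySem.Dict.getD pvExclusionMap region []
    match pvTryPrefixes name region exclusions prefixes with
    | some r => some r
    | none => pvClassifyLoop name rest

def pvClassifyChannel (name : String) : Option String :=
  pvClassifyLoop name pvRegionPrefixes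

def build_channel_groups_py (channel_names : List String) : List (String × List Int) :=
  let groups : PySem.Dict String (List Int) :=
    PySem.Dict.ofList
      [("frontal", []), ("central", []), ("parietal", []), ("occipital", []), ("temporal", [])]
  -- 'for idx, name in enumerate(channel_names)'; groups[region].append(idx) is
  -- Dict.modify (region is always a key of groups, so the default [] is never used)
  let groups :=
    (PySem.List.enumerate channel_names).foldl
      (fun g p =>
        match pvClassifyChannel p.2 with
        | some region => PySem.Dict.modify g region [] (fun xs => xs ++ [p.1])
        | none => g)
      groups
  groups.items

-- ===== PORT B =====
-- module constant _PREFIX_REGION of Source B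
def pvPrefixRegion : PySem.Dict String String :=
  PySem.Dict.ofList
    [("Fp", "frontal"), ("AF", "frontal"), ("F", "frontal"),
     ("FC", "central"), ("C", "central"),
     ("CP", "parietal"), ("P", "parietal"),
     ("PO", "occipital"), ("O", "occipital"),
     ("TP", "temporal"), ("T", "temporal")]

def pvRegions : List String := ["frontal", "central", "parietal", "occipital", "temporal"]

-- _region_of: longest-prefix lookup on name[:2], falling back to name[:1]
def pvRegionOf (name : String) : Option String :=
  match PySem.Dict.get? pvPrefixRegion (PySem.Str.slice name none (some 2)) with
  | some r => some r
  | none => PySem.Dict.get? pvPrefixRegion (PySem.Str.slice name none (some 1))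

def build_channel_groups_py_alt (channel_names : List String) : List (String × List Int) :=
  let labels := channel_names.map pvRegionOf
  pvRegions.map (fun r =>
    (r, (PySem.List.enumerate labels).filterMap
          (fun p => if p.2 = some r then some p.1 else none)))

-- ===== PRECONDITION & SPEC =====
def Spec_build_channel_groups_py (channel_names : List String) (out : List (String × List Int)) : Prop := out = build_channel_groups_py_alt channel_names
instance (channel_names : List String) (out : List (String × List Int)) : Decidable (Spec_build_channel_groups_py channel_names out) := by unfold Spec_build_channel_groups_py; infer_instance

-- ===== CLAIM (what is proved, stated in full; the proofs are below) =====
def Claim_equal_build_channel_groups_py : Prop := ∀ (channel_names : List String), Dom_build_channel_groups_py channel_names → Spec_build_channel_groups_py channel_names (build_channel_groups_py channel_names)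

-- ===== LEMMAS AND PROOFS =====



theorem toList_eq_iff (key : String) (l : List Char) : key = String.ofList l ↔ key.toList = l := by
  constructor
  · rintro rfl; simp
  · intro h; rw [← String.ofList_toList (s := key), h]

theorem beq_ofList (key : String) (l : List Char) : (key == String.ofList l) = (key.toList == l) := by
  by_cases h : key.toList = l
  · simp [(toList_eq_iff key l).mpr h]
  · have hne : key ≠ String.ofList l := fun e => h ((toList_eq_iff key l).mp e)
    simp [h, hne]

theorem prefixRegion_mk : pvPrefixRegion = PySem.Dict.mk
    [("Fp", "frontal"), ("AF", "frontal"), ("F", "frontal"), ("FC", "central"), ("C", "central"),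
     ("CP", "parietal"), ("P", "parietal"), ("PO", "occipital"), ("O", "occipital"),
     ("TP", "temporal"), ("T", "temporal")] := by decide

theorem exclusionMap_mk : pvExclusionMap = PySem.Dict.mk
    [("frontal", ["FC"]), ("central", ["CP"]), ("parietal", ["PO"]), ("occipital", []), ("temporal", [])] := by decide

theorem get?_mk_nil {kappa nu : Type} [BEq kappa] (k : kappa) : (PySem.Dict.mk ([] : List (kappa × nu))).get? k = none := rfl

set_option maxHeartbeats 1000000 in
theorem classify_eq_regionOf (name : String) : pvClassifyChannel name = pvRegionOf name := by
  rw [← String.ofList_toList (s := name)]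
  generalize name.toList = cs
  match cs with
  | [] => decide
  | [c] =>
      simp [pvClassifyChannel, pvClassifyLoop, pvTryPrefixes, pvRegionOf, pvRegionPrefixes,
        exclusionMap_mk, prefixRegion_mk, PySem.Str.startswith, PySem.Chars.startswith,
        PySem.Str.slice, PySem.Chars.slice_eq_listSlice, PySem.Dict.getD, PySem.Dict.get?_mk_cons, get?_mk_nil,
        beq_ofList, String.toList_ofList, PySem.List.slice, PySem.List.clampIdx, List.isPrefixOf, List.any]
      split_ifs <;> rfl
  | c :: d :: t =>
      simp [pvClassifyChannel, pvClassifyLoop, pvTryPrefixes, pvRegionOf, pvRegionPrefixes,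
        exclusionMap_mk, prefixRegion_mk, PySem.Str.startswith, PySem.Chars.startswith,
        PySem.Str.slice, PySem.Chars.slice_eq_listSlice, PySem.Dict.getD, PySem.Dict.get?_mk_cons, get?_mk_nil,
        beq_ofList, String.toList_ofList, PySem.List.slice, PySem.List.clampIdx, List.isPrefixOf, List.any]
      split_ifs <;> (try rfl) <;> simp_all [eq_comm]

set_option maxHeartbeats 1000000 in
theorem regionOf_cases (name : String) :
    pvRegionOf name = none ∨ pvRegionOf name = some "frontal" ∨
    pvRegionOf name = some "central" ∨ pvRegionOf name = some "parietal" ∨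
    pvRegionOf name = some "occipital" ∨ pvRegionOf name = some "temporal" := by
  have h : ∀ k : String, PySem.Dict.get? pvPrefixRegion k = none ∨
      PySem.Dict.get? pvPrefixRegion k = some "frontal" ∨
      PySem.Dict.get? pvPrefixRegion k = some "central" ∨
      PySem.Dict.get? pvPrefixRegion k = some "parietal" ∨
      PySem.Dict.get? pvPrefixRegion k = some "occipital" ∨
      PySem.Dict.get? pvPrefixRegion k = some "temporal" := by
    intro k
    simp only [prefixRegion_mk, PySem.Dict.get?_mk_cons, get?_mk_nil]
    split_ifs <;> simp
  unfold pvRegionOf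
  rcases h (PySem.Str.slice name none (some 2)) with h2 | h2 | h2 | h2 | h2 | h2 <;>
    rcases h (PySem.Str.slice name none (some 1)) with h1 | h1 | h1 | h1 | h1 | h1 <;>
    rw [h2] <;> simp only [] <;> (try rw [h1]) <;> simp

def pvCollect (l : List (Int × String)) (r : String) : List Int :=
  l.filterMap (fun p => if pvRegionOf p.2 = some r then some p.1 else none)

theorem modify_mk (r : String) (hr : r = "frontal" ∨ r = "central" ∨ r = "parietal" ∨ r = "occipital" ∨ r = "temporal")
    (a b c d e : List Int) (i : Int) :
    PySem.Dict.modify (PySem.Dict.mk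
        [("frontal", a), ("central", b), ("parietal", c), ("occipital", d), ("temporal", e)])
      r [] (fun xs => xs ++ [i])
    = PySem.Dict.mk
        [("frontal", if r = "frontal" then a ++ [i] else a),
         ("central", if r = "central" then b ++ [i] else b),
         ("parietal", if r = "parietal" then c ++ [i] else c),
         ("occipital", if r = "occipital" then d ++ [i] else d),
         ("temporal", if r = "temporal" then e ++ [i] else e)] := by
  rcases hr with rfl | rfl | rfl | rfl | rfl <;> rfl

set_option maxHeartbeats 1000000 in
theorem foldA_items (l : List (Int × String)) (a b c d e : List Int) :
    ((l.foldl
        (fun g p =>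
          match pvClassifyChannel p.2 with
          | some region => PySem.Dict.modify g region [] (fun xs => xs ++ [p.1])
          | none => g)
        (PySem.Dict.mk
          [("frontal", a), ("central", b), ("parietal", c), ("occipital", d), ("temporal", e)])).items)
    = [("frontal", a ++ pvCollect l "frontal"),
       ("central", b ++ pvCollect l "central"),
       ("parietal", c ++ pvCollect l "parietal"),
       ("occipital", d ++ pvCollect l "occipital"),
       ("temporal", e ++ pvCollect l "temporal")] := by
  induction l generalizing a b c d e with
  | nil => simp [pvCollect]
  | cons p t ih =>
    rw [List.foldl_cons]
    rcases regionOf_cases p.2 with h | h | h | h | h | h <;>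
      have hc := (classify_eq_regionOf p.2).trans h <;>
      simp only [hc]
    case _ => rw [ih]; simp [pvCollect, h]
    all_goals
      rw [modify_mk _ (by simp), ih]
      simp [pvCollect, h]

theorem enumerate_map {α β : Type} (f : α → β) (xs : List α) (k : Int) :
    PySem.List.enumerate (xs.map f) k
      = (PySem.List.enumerate xs k).map (fun p => (p.1, f p.2)) := by
  induction xs generalizing k with
  | nil => simp [PySem.List.enumerate]
  | cons x t ih => simp [PySem.List.enumerate, ih]

-- ===== VERDICT (by name: the statement is the Claim_ definition above) =====
theorem build_channel_groups_py_spec : Claim_equal_build_channel_groups_py := by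
  intro channel_names _
  unfold Spec_build_channel_groups_py build_channel_groups_py build_channel_groups_py_alt
  simp only []
  rw [show (PySem.Dict.ofList
        [("frontal", ([] : List Int)), ("central", []), ("parietal", []), ("occipital", []), ("temporal", [])])
      = PySem.Dict.mk
        [("frontal", []), ("central", []), ("parietal", []), ("occipital", []), ("temporal", [])] from rfl]
  rw [foldA_items, enumerate_map]
  simp [pvRegions, pvCollect, List.filterMap_map]
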